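-- pv_equiv track=rewrite | github.com/willi19/isaac | src/learning/preprocess.py | downsample_indices
-- ===== SOURCE A (Python) =====
-- def downsample_indices(n, target_length):
--     # 0~n
--     r = n // target_length
--     ret = [0]
--     for i in range(target_length):
--         if i < n % target_length:
--             ret.append(ret[-1] + r + 1)
--         else:
--             ret.append(ret[-1] + r)
--     return ret
-- ===== SOURCE B (Python) =====
-- def downsample_indices(n, target_length):
--     # closed form: boundary k is k*r + min(k, m), independent of its predecessor
--     r, m = divmod(n, target_length)
--     return [0] + [k * r + min(k, m) for k in range(1, target_length + 1)]
-- ===== Notes on version B (the rewrite author's own statement) =====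
-- stated objective: simpler
-- what changed: Replaces the running ret[-1] prefix accumulation with a direct closed form k*r + min(k, m) computed independently for each boundary index k.
import Mathlib
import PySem

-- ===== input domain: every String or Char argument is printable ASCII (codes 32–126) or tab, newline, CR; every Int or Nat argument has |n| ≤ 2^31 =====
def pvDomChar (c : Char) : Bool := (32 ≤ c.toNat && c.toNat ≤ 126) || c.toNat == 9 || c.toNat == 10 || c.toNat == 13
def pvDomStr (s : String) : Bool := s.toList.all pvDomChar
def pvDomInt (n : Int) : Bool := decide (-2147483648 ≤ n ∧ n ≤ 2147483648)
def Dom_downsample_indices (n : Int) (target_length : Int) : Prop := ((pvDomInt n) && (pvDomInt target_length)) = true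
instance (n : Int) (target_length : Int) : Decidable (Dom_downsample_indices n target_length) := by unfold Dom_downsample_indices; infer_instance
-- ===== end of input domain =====

-- B computes each boundary directly as k*r + min(k, m) instead of A's running ret[-1] accumulation (objective: simpler).


-- ===== PORT A =====
def downsample_indices (n : Int) (target_length : Int) : List Int :=
  let r := PySem.Int.floordiv n target_length
  (PySem.List.pyRange 0 target_length 1).foldl
    (fun ret i =>
      if i < PySem.Int.mod n target_length then
        ret ++ [PySem.List.pyGetD ret (-1) 0 + r + 1]
      else
        ret ++ [PySem.List.pyGetD ret (-1) 0 + r])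
    [0]

-- ===== PORT B =====
def downsample_indices_alt (n : Int) (target_length : Int) : List Int :=
  let r := PySem.Int.floordiv n target_length
  let m := PySem.Int.mod n target_length
  0 :: (PySem.List.pyRange 1 (target_length + 1) 1).map (fun k => k * r + min k m)

-- ===== PRECONDITION & SPEC =====
-- Pre_ excludes exactly target_length = 0, where Python A (and B) raise ZeroDivisionError.
def Pre_downsample_indices (n : Int) (target_length : Int) : Prop := target_length ≠ 0
instance (n : Int) (target_length : Int) : Decidable (Pre_downsample_indices n target_length) := by unfold Pre_downsample_indices; infer_instance
def pvWitness_downsample_indices : Int × Int := (10, 3)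
def Spec_downsample_indices (n : Int) (target_length : Int) (out : List Int) : Prop := out = downsample_indices_alt n target_length
instance (n : Int) (target_length : Int) (out : List Int) : Decidable (Spec_downsample_indices n target_length out) := by unfold Spec_downsample_indices; infer_instance

-- ===== CLAIM (what is proved, stated in full; the proofs are below) =====
def Claim_equal_downsample_indices : Prop := ∀ (n : Int) (target_length : Int), Dom_downsample_indices n target_length → Pre_downsample_indices n target_length → Spec_downsample_indices n target_length (downsample_indices n target_length)

-- ===== LEMMAS AND PROOFS =====

-- A's loop over range(0, j) produces exactly B's closed-form list up to index j (0 ≤ n % tl, i.e. tl > 0).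
theorem downsample_loop_closed (n tl : Int) (hm : 0 ≤ PySem.Int.mod n tl) (j : Nat) :
    (PySem.List.pyRange 0 (j : Int) 1).foldl
      (fun ret i =>
        if i < PySem.Int.mod n tl then
          ret ++ [PySem.List.pyGetD ret (-1) 0 + PySem.Int.floordiv n tl + 1]
        else
          ret ++ [PySem.List.pyGetD ret (-1) 0 + PySem.Int.floordiv n tl])
      [0]
    = 0 :: (PySem.List.pyRange 1 ((j : Int) + 1) 1).map
        (fun k => k * PySem.Int.floordiv n tl + min k (PySem.Int.mod n tl)) := by
  induction j with
  | zero =>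
    simp [PySem.List.pyRange_one_eq_nil]
  | succ j ih =>
    rw [show ((j + 1 : Nat) : Int) = (j : Int) + 1 by push_cast; ring,
        PySem.List.pyRange_one_succ_right (by omega : (0:Int) ≤ (j:Int)),
        PySem.List.pyRange_one_succ_right (by omega : (1:Int) ≤ (j:Int) + 1),
        List.foldl_append, ih]
    simp only [List.foldl_cons, List.foldl_nil, List.map_append, List.map_cons, List.map_nil]
    have hlast :
        PySem.List.pyGetD (0 :: (PySem.List.pyRange 1 ((j : Int) + 1) 1).map
          (fun k => k * PySem.Int.floordiv n tl + min k (PySem.Int.mod n tl))) (-1) 0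
        = (j : Int) * PySem.Int.floordiv n tl + min (j : Int) (PySem.Int.mod n tl) := by
      rcases Nat.eq_zero_or_pos j with hj | hj
      · subst hj
        simp [PySem.List.pyRange_one_eq_nil, PySem.List.pyGetD_neg_one]
        omega
      · rw [show ((j : Int) + 1) = (j - 1 : Int) + 1 + 1 by ring,
            PySem.List.pyRange_one_succ_right (by omega : (1:Int) ≤ (j:Int) - 1 + 1)]
        simp only [List.map_append, List.map_cons, List.map_nil]
        rw [show (0 :: ((PySem.List.pyRange 1 ((j:Int) - 1 + 1) 1).map
              (fun k => k * PySem.Int.floordiv n tl + min k (PySem.Int.mod n tl)) ++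
              [((j:Int) - 1 + 1) * PySem.Int.floordiv n tl + min ((j:Int) - 1 + 1) (PySem.Int.mod n tl)]))
            = (0 :: (PySem.List.pyRange 1 ((j:Int) - 1 + 1) 1).map
              (fun k => k * PySem.Int.floordiv n tl + min k (PySem.Int.mod n tl))) ++
              [((j:Int) - 1 + 1) * PySem.Int.floordiv n tl + min ((j:Int) - 1 + 1) (PySem.Int.mod n tl)]
            from rfl,
            PySem.List.pyGetD_neg_one_append_singleton]
        ring_nf
    rw [hlast]
    split_ifs with h
    · have hmin : min ((j : Int) + 1) (PySem.Int.mod n tl) = min (j : Int) (PySem.Int.mod n tl) + 1 := by omega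
      rw [hmin]; ring_nf; rw [List.cons_append]
    · have hmin : min ((j : Int) + 1) (PySem.Int.mod n tl) = min (j : Int) (PySem.Int.mod n tl) := by omega
      rw [hmin]; ring_nf; rw [List.cons_append]

-- ===== VERDICT (by name: the statement is the Claim_ definition above) =====
theorem downsample_indices_spec : Claim_equal_downsample_indices := by
  intro n tl _ hpre
  unfold Spec_downsample_indices downsample_indices downsample_indices_alt
  rcases le_or_gt tl 0 with hle | hpos
  · simp [PySem.List.pyRange_one_eq_nil hle, PySem.List.pyRange_one_eq_nil (by omega : tl + 1 ≤ 1)]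
  · have := downsample_loop_closed n tl (PySem.Int.mod_nonneg n hpos) tl.toNat
    rwa [Int.toNat_of_nonneg (by omega)] at this
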